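-- pv_equiv track=rewrite | github.com/parth-g04/DATA_COMPRESSION_DAA | shannon_fano.py | shannon_fano_decompress
-- ===== SOURCE A (Python) =====
-- def shannon_fano_decompress(encoded_text, codes_table):
--     """Decompresses a string using the Shannon-Fano codes table."""
--     if not encoded_text:
--         return ""
--
--     # Invert the codes table: {'01': 'a', '10': 'b'}
--     reversed_codes_table = {code: char for char, code in codes_table.items()}
--
--     decoded_text = ""
--     current_code = ""
--
--     for bit in encoded_text:
--         current_code += bit
--         # Check if the current sequence of bits is a valid code
--         if current_code in reversed_codes_table:
--             # If it is, add the character to our result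
--             char = reversed_codes_table[current_code]
--             decoded_text += char
--             # Reset the current code
--             current_code = ""
--
--     return decoded_text
-- ===== SOURCE B (Python) =====
-- def shannon_fano_decompress(encoded_text, codes_table):
--     """Decompresses a string using a prefix trie built from the codes table."""
--     # Build a trie: each node is [char_or_None, children_dict].
--     root = [None, {}]
--     for char, code in codes_table.items():
--         node = root
--         for bit in code:
--             node = node[1].setdefault(bit, [None, {}])
--         node[0] = char
--     out = []
--     node = root
--     for bit in encoded_text:
--         node = node[1].get(bit) if node is not None else None
--         if node is not None and node[0] is not None:
--             out.append(node[0])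
--             node = root
--     return "".join(out)
-- ===== Notes on version B (the rewrite author's own statement) =====
-- stated objective: alternative
-- what changed: Replaces the grow-a-string-and-test-dict-membership scan with a prefix trie built once from the codes table; decoding walks the trie bit by bit (descending to a child, emitting and resetting at a node that carries a character, going permanently dead off-trie), so no code string is ever re-assembled or hashed during the scan.
import Mathlib
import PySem

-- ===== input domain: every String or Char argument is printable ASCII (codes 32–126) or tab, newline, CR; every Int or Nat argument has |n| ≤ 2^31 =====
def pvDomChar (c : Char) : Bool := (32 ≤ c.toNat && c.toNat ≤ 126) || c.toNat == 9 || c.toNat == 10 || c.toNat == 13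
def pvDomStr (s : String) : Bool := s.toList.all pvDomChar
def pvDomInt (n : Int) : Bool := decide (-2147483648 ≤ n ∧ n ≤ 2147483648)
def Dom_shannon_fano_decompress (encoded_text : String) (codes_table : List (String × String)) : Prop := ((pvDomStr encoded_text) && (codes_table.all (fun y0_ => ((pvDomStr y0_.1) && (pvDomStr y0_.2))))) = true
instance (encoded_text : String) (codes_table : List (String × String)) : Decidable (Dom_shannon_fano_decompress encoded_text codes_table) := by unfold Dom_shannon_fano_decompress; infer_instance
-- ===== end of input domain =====

-- B replaces A's grow-a-string-and-test-dict-membership scan by a prefix trie built once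
-- from the codes table and walked bit by bit (objective: alternative algorithm/data structure).

-- ===== PORT A =====
def shannon_fano_decompress (encoded_text : String) (codes_table : List (String × String)) : String :=
  if encoded_text = "" then "" else
    let rev : PySem.Dict String String :=
      codes_table.foldl (fun d p => d.insert p.2 p.1) PySem.Dict.empty
    let st := encoded_text.toList.foldl (fun (st : String × String) bit =>
      let cur := st.2.push bit
      match rev.get? cur with
      | some ch => (st.1 ++ ch, "")
      | none => (st.1, cur)) ("", "")
    st.1

-- ===== PORT B =====
-- trie node: optional character (a String, as in Python) + children
mutual
inductive PTrie where
  | mk : Option String → PChildren → PTrie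
inductive PChildren where
  | nil : PChildren
  | cons : Char → PTrie → PChildren → PChildren
end

def PChildren.child? : PChildren → Char → Option PTrie
  | .nil, _ => none
  | .cons c t rest, b => if b = c then some t else PChildren.child? rest b

def PChildren.set : PChildren → Char → PTrie → PChildren
  | .nil, b, t => .cons b t .nil
  | .cons c u rest, b, t => if b = c then .cons c t rest else .cons c u (PChildren.set rest b t)

def PTrie.empty : PTrie := .mk none .nil

def trieInsert : PTrie → List Char → String → PTrie
  | .mk _ ch, [], v => .mk (some v) ch
  | .mk v0 ch, b :: rest, v =>
      .mk v0 (ch.set b (trieInsert ((ch.child? b).getD PTrie.empty) rest v))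

-- node[1].get(bit) if node is not None else None
def trieStep : Option PTrie → Char → Option PTrie
  | none, _ => none
  | some (.mk _ ch), b => ch.child? b

def buildTrie (codes_table : List (String × String)) : PTrie :=
  codes_table.foldl (fun t p => trieInsert t p.2.toList p.1) PTrie.empty

def shannon_fano_decompress_alt (encoded_text : String) (codes_table : List (String × String)) : String :=
  let root := buildTrie codes_table
  let st := encoded_text.toList.foldl (fun (st : Option PTrie × List String) bit =>
    let node := trieStep st.1 bit
    match node with
    | some (.mk (some c) _) => (some root, st.2 ++ [c])
    | n => (n, st.2)) (some root, ([] : List String))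
  String.join st.2

-- ===== PRECONDITION & SPEC =====
def Spec_shannon_fano_decompress (encoded_text : String) (codes_table : List (String × String)) (out : String) : Prop := out = shannon_fano_decompress_alt encoded_text codes_table
instance (encoded_text : String) (codes_table : List (String × String)) (out : String) : Decidable (Spec_shannon_fano_decompress encoded_text codes_table out) := by unfold Spec_shannon_fano_decompress; infer_instance

-- ===== CLAIM (what is proved, stated in full; the proofs are below) =====
def Claim_equal_shannon_fano_decompress : Prop := ∀ (encoded_text : String) (codes_table : List (String × String)), Dom_shannon_fano_decompress encoded_text codes_table → Spec_shannon_fano_decompress encoded_text codes_table (shannon_fano_decompress encoded_text codes_table)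

-- ===== LEMMAS AND PROOFS =====

def charOf : PTrie → Option String
  | .mk v _ => v

def descendO : Option PTrie → List Char → Option PTrie
  | n, [] => n
  | n, b :: rest => descendO (trieStep n b) rest

def look (t : PTrie) (p : List Char) : Option String :=
  (descendO (some t) p).bind charOf

theorem descendO_none (p : List Char) : descendO none p = none := by
  induction p with
  | nil => rfl
  | cons b rest ih => simpa [descendO, trieStep] using ih

theorem descendO_append (p : List Char) : ∀ (n : Option PTrie) (b : Char),
    descendO n (p ++ [b]) = trieStep (descendO n p) b := by
  induction p with
  | nil => intro n b; rfl
  | cons c rest ih => intro n b; simp [descendO, ih]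

theorem look_empty (p : List Char) : look PTrie.empty p = none := by
  cases p with
  | nil => rfl
  | cons b rest =>
    simp [look, descendO, trieStep, PTrie.empty, PChildren.child?, descendO_none]

theorem child?_set : ∀ (ch : PChildren) (c b : Char) (u : PTrie),
    (ch.set c u).child? b = if b = c then some u else ch.child? b
  | .nil, c, b, u => by simp [PChildren.set, PChildren.child?]
  | .cons c' t' rest, c, b, u => by
    have ih := child?_set rest c b u
    by_cases h1 : c = c'
    · subst h1
      by_cases h2 : b = c <;> simp [PChildren.set, PChildren.child?, h2]
    · by_cases h2 : b = c'
      · subst h2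
        simp [PChildren.set, PChildren.child?, h1, Ne.symm h1]
      · simp [PChildren.set, PChildren.child?, h1, h2, ih]

theorem look_insert (code : List Char) : ∀ (t : PTrie) (v : String) (p : List Char),
    look (trieInsert t code v) p = if p = code then some v else look t p := by
  induction code with
  | nil =>
    intro t v p
    cases t with
    | mk v0 ch =>
      cases p with
      | nil => simp [trieInsert, look, descendO, charOf]
      | cons b rest => simp [trieInsert, look, descendO, trieStep, charOf]
  | cons c cs ih =>
    intro t v p
    cases t with
    | mk v0 ch =>
      cases p with
      | nil => simp [trieInsert, look, descendO, charOf]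
      | cons b rest =>
        by_cases hb : b = c
        · subst hb
          have hstep : look (PTrie.mk v0 (ch.set b (trieInsert ((ch.child? b).getD PTrie.empty) cs v))) (b :: rest)
              = look (trieInsert ((ch.child? b).getD PTrie.empty) cs v) rest := by
            simp [look, descendO, trieStep, child?_set]
          rw [trieInsert, hstep, ih]
          by_cases hr : rest = cs
          · simp [hr]
          · simp only [if_false, List.cons.injEq, true_and, hr]
            cases hch : ch.child? b with
            | none =>
              have he := look_empty rest
              simp only [look] at he
              simp [look, descendO, trieStep, hch, descendO_none, he]
            | some u => simp [look, descendO, trieStep, hch]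
        · have hne : (b :: rest) ≠ (c :: cs) := by simp [hb]
          simp [trieInsert, look, descendO, trieStep, child?_set, hb, hne]

theorem look_build_aux (l : List (String × String)) :
    ∀ (t : PTrie) (d : PySem.Dict String String),
    (∀ p : List Char, look t p = d.get? (String.ofList p)) →
    ∀ p : List Char,
      look (l.foldl (fun t q => trieInsert t q.2.toList q.1) t) p
        = (l.foldl (fun d q => d.insert q.2 q.1) d).get? (String.ofList p) := by
  induction l with
  | nil => intro t d h p; simpa using h p
  | cons q rest ih =>
    intro t d h p
    simp only [List.foldl_cons]
    refine ih _ _ ?_ p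
    intro p'
    rw [look_insert, PySem.Dict.get?_insert]
    have hmk : String.ofList q.2.toList = q.2 := by simp
    by_cases hp : p' = q.2.toList
    · simp [hp, hmk]
    · have hne : String.ofList p' ≠ q.2 := by
        intro hcontra
        apply hp
        rw [← hmk] at hcontra
        have := congrArg String.toList hcontra
        simpa using this
      simp [hp, hne]
      exact h p' 

theorem look_build (codes_table : List (String × String)) (p : List Char) :
    look (buildTrie codes_table) p
      = (codes_table.foldl (fun d (q : String × String) => d.insert q.2 q.1) PySem.Dict.empty).get? (String.ofList p) := by
  refine look_build_aux codes_table PTrie.empty PySem.Dict.empty ?_ p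
  intro p'
  simp [look_empty, PySem.Dict.get?_empty]

theorem join_append (l : List String) (s : String) :
    String.join (l ++ [s]) = String.join l ++ s := by
  simp [String.join]

theorem scan_eq (bits : List Char) :
    ∀ (root : PTrie) (rev : PySem.Dict String String),
    (∀ p : List Char, look root p = rev.get? (String.ofList p)) →
    ∀ (cur : String) (node : Option PTrie) (dec : String) (out : List String),
    node = descendO (some root) cur.toList →
    dec = String.join out →
    (bits.foldl (fun (st : String × String) bit =>
        let cur := st.2.push bit
        match rev.get? cur with
        | some ch => (st.1 ++ ch, "")
        | none => (st.1, cur)) (dec, cur)).1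
      = String.join (bits.foldl (fun (st : Option PTrie × List String) bit =>
          let node := trieStep st.1 bit
          match node with
          | some (.mk (some c) _) => (some root, st.2 ++ [c])
          | n => (n, st.2)) (node, out)).2 := by
  induction bits with
  | nil => intro root rev hrev cur node dec out hn hd; simpa using hd
  | cons b rest ih =>
    intro root rev hrev cur node dec out hn hd
    have hcur' : (cur.push b).toList = cur.toList ++ [b] := by simp
    have hnode' : trieStep node b = descendO (some root) (cur.push b).toList := by
      rw [hn, hcur', descendO_append]
    have hget : rev.get? (cur.push b) = (trieStep node b).bind charOf := by
      have h1 := hrev ((cur.push b).toList)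
      have h2 : String.ofList ((cur.push b).toList) = cur.push b := String.ofList_toList
      rw [h2] at h1
      rw [← h1, look, ← hnode']
    simp only [List.foldl_cons]
    cases hstep : trieStep node b with
    | none =>
      have hg : rev.get? (cur.push b) = none := by rw [hget, hstep]; rfl
      have := ih root rev hrev (cur.push b) none dec out (by rw [← hstep, hnode']) hd
      simpa [hg, hstep] using this
    | some t =>
      cases t with
      | mk v ch =>
        cases v with
        | none =>
          have hg : rev.get? (cur.push b) = none := by rw [hget, hstep]; rfl
          have := ih root rev hrev (cur.push b) (some (.mk none ch)) dec out
            (by rw [← hstep, hnode']) hd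
          simpa [hg, hstep] using this
        | some c =>
          have hg : rev.get? (cur.push b) = some c := by rw [hget, hstep]; rfl
          have := ih root rev hrev "" (some root) (dec ++ c) (out ++ [c])
            (by simp [descendO]) (by rw [hd, join_append])
          simpa [hg, hstep] using this

-- ===== VERDICT (by name: the statement is the Claim_ definition above) =====
theorem shannon_fano_decompress_spec : Claim_equal_shannon_fano_decompress := by
  intro enc ct _
  unfold Spec_shannon_fano_decompress shannon_fano_decompress shannon_fano_decompress_alt
  by_cases h : enc = ""
  · subst h; simp [String.join]
  · simp only [if_neg h]
    exact scan_eq enc.toList (buildTrie ct)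
      (ct.foldl (fun d (p : String × String) => d.insert p.2 p.1) PySem.Dict.empty)
      (fun p => look_build ct p) "" (some (buildTrie ct)) "" []
      (by simp [descendO]) rfl
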